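-- pv_equiv track=rewrite | github.com/yuvan03/sequence-processing | filter_sequence.py | first_letter_filter
-- ===== SOURCE A (Python) =====
-- def first_letter_filter(letter, phrase):
--   """Returns the words in [phrase] with starting letter after [letter]"""
--   result, word = "", ""
--   for letter in phrase:
--     if letter.isalpha():
--       word += letter
--     elif word.lower() > "h":
--       result += word.upper() + " "
--       word = ""
--     else:
--       word = ""
--   if word.lower() > "h":
--     result += word.upper()
--   return result
-- ===== SOURCE B (Python) =====
-- def first_letter_filter(letter, phrase):
--     """Returns the words in [phrase] with starting letter after [letter]"""
--     n = len(phrase)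
--     pieces = []
--     i = 0
--     while i < n:
--         if not phrase[i].isalpha():
--             i += 1
--             continue
--         j = i
--         while j < n and phrase[j].isalpha():
--             j += 1
--         chunk = phrase[i:j]
--         if chunk.lower() > "h":
--             pieces.append(chunk.upper() + ("" if j == n else " "))
--         i = j
--     return "".join(pieces)
-- ===== Notes on version B (the rewrite author's own statement) =====
-- stated objective: alternative
-- what changed: Replaces the char-by-char accumulator loop with leftover-word state and in-loop string concatenation by an index-based scanner that slices each maximal alphabetic run, collects qualifying runs in a list and joins once at the end.
import Mathlib
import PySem

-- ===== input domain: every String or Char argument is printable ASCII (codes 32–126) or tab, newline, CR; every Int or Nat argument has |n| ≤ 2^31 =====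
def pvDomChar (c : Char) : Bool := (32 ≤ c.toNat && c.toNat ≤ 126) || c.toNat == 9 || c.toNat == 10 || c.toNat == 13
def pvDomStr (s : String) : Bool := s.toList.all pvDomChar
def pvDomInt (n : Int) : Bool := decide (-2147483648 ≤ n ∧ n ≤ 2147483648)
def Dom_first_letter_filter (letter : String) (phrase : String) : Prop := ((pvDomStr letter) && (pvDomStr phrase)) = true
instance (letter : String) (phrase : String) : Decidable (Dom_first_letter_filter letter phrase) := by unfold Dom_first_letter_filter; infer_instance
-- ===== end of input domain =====

-- B replaces A's char-by-char word accumulator by an index-free run scanner that slices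
-- maximal alphabetic runs and joins the collected pieces once (objective: alternative).

-- ===== PORT A =====
-- state (result, word), one step per character, exactly A's loop body
def pvStepA (st : List Char × List Char) (c : Char) : List Char × List Char :=
  if PySem.Chars.isalpha c then (st.1, st.2 ++ [c])
  else if PySem.Chars.strLt ['h'] (PySem.Chars.lower st.2) then (st.1 ++ PySem.Chars.upper st.2 ++ [' '], [])
  else (st.1, [])

def first_letter_filter (letter : String) (phrase : String) : String :=
  let st := phrase.toList.foldl pvStepA ([], [])
  if PySem.Chars.strLt ['h'] (PySem.Chars.lower st.2) then String.ofList (st.1 ++ PySem.Chars.upper st.2)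
  else String.ofList st.1

-- ===== PORT B =====
-- Source B's outer while-loop: skip a non-alpha char, or slice off the maximal alpha run
-- (run = c :: takeWhile, rest' = dropWhile mirrors phrase[i:j] / resuming at j)
def pvRunsB : List Char → List (List Char)
  | [] => []
  | c :: rest =>
    if PySem.Chars.isalpha c then
      let run := c :: rest.takeWhile PySem.Chars.isalpha
      let rest' := rest.dropWhile PySem.Chars.isalpha
      (if PySem.Chars.strLt ['h'] (PySem.Chars.lower run)
       then [PySem.Chars.upper run ++ (if rest' = [] then [] else [' '])] else []) ++ pvRunsB rest'
    else pvRunsB rest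
termination_by cs => cs.length
decreasing_by
  · simpa using Nat.lt_succ_of_le (List.length_dropWhile_le _ _)
  · simp

def first_letter_filter_alt (letter : String) (phrase : String) : String :=
  String.ofList (PySem.Chars.join [] (pvRunsB phrase.toList))

-- ===== PRECONDITION & SPEC =====
def Spec_first_letter_filter (letter : String) (phrase : String) (out : String) : Prop := out = first_letter_filter_alt letter phrase
instance (letter : String) (phrase : String) (out : String) : Decidable (Spec_first_letter_filter letter phrase out) := by unfold Spec_first_letter_filter; infer_instance

-- ===== CLAIM (what is proved, stated in full; the proofs are below) =====
def Claim_equal_first_letter_filter : Prop := ∀ (letter : String) (phrase : String), Dom_first_letter_filter letter phrase → Spec_first_letter_filter letter phrase (first_letter_filter letter phrase)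

-- ===== LEMMAS AND PROOFS =====

-- what A's loop contributes after the state's word is `word` and the remaining input is `cs`
def pvEmit (word : List Char) : List Char → List Char
  | [] => if PySem.Chars.strLt ['h'] (PySem.Chars.lower word) then PySem.Chars.upper word else []
  | c :: cs =>
    if PySem.Chars.isalpha c then pvEmit (word ++ [c]) cs
    else (if PySem.Chars.strLt ['h'] (PySem.Chars.lower word) then PySem.Chars.upper word ++ [' '] else []) ++ pvEmit [] cs

-- A's fold, finalized, is the accumulated result plus pvEmit of the pending word
lemma pvFoldA_emit (cs : List Char) : ∀ (res word : List Char),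
    (if PySem.Chars.strLt ['h'] (PySem.Chars.lower (cs.foldl pvStepA (res, word)).2)
     then (cs.foldl pvStepA (res, word)).1 ++ PySem.Chars.upper (cs.foldl pvStepA (res, word)).2
     else (cs.foldl pvStepA (res, word)).1) = res ++ pvEmit word cs := by
  induction cs with
  | nil => intro res word; simp [pvEmit]; split <;> simp
  | cons c cs ih =>
    intro res word
    by_cases h : PySem.Chars.isalpha c
    · simp [pvStepA, h, pvEmit, ih]
    · by_cases h2 : PySem.Chars.strLt ['h'] (PySem.Chars.lower word) <;>
        simp [pvStepA, h, h2, pvEmit, ih]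

-- pvEmit processed through the current run: run/rest' decomposition
lemma pvEmit_run (rest : List Char) : ∀ (word : List Char),
    pvEmit word rest =
      (match rest.dropWhile PySem.Chars.isalpha with
       | [] => if PySem.Chars.strLt ['h'] (PySem.Chars.lower (word ++ rest.takeWhile PySem.Chars.isalpha))
               then PySem.Chars.upper (word ++ rest.takeWhile PySem.Chars.isalpha) else []
       | _ :: tail =>
         (if PySem.Chars.strLt ['h'] (PySem.Chars.lower (word ++ rest.takeWhile PySem.Chars.isalpha))
          then PySem.Chars.upper (word ++ rest.takeWhile PySem.Chars.isalpha) ++ [' '] else []) ++ pvEmit [] tail) := by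
  induction rest with
  | nil => intro word; simp [pvEmit]
  | cons c cs ih =>
    intro word
    by_cases h : PySem.Chars.isalpha c
    · simp only [pvEmit, h, if_pos, List.takeWhile_cons, List.dropWhile_cons]
      rw [ih (word ++ [c])]
      simp [List.append_assoc]
    · simp [pvEmit, h]

lemma pvEmit_nil_eq_runs (cs : List Char) : pvEmit [] cs = (pvRunsB cs).flatten := by
  induction cs using pvRunsB.induct with
  | case1 => simp [pvEmit, pvRunsB, PySem.Chars.lower, PySem.Chars.strLt]
  | case2 c rest h rest' ih =>
    have ih' : pvEmit [] (rest.dropWhile PySem.Chars.isalpha)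
        = (pvRunsB (rest.dropWhile PySem.Chars.isalpha)).flatten := ih
    rw [pvRunsB]
    simp only [h, if_true]
    rw [pvEmit, if_pos h, pvEmit_run]
    cases hr : rest.dropWhile PySem.Chars.isalpha with
    | nil =>
      rw [hr] at ih'
      simp [pvRunsB, pvEmit] at *
      split <;> simp_all
    | cons d tail =>
      have hd : PySem.Chars.isalpha d = false := by
        have := List.head_dropWhile_not (p := PySem.Chars.isalpha) (l := rest) (by simp [hr])
        simpa [hr] using this
      rw [hr] at ih'
      have hrw : pvRunsB (d :: tail) = pvRunsB tail := by rw [pvRunsB]; simp [hd]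
      rw [hrw] at ih'
      simp only [pvEmit, hd, Bool.false_eq_true, if_false] at ih'
      have hbase : PySem.Chars.strLt ['h'] (PySem.Chars.lower []) = false := by decide
      simp only [hbase, Bool.false_eq_true, if_false, List.nil_append] at ih'
      simp only [List.cons_ne_nil, if_false, List.nil_append, List.flatten_append, ih', hrw,
        List.singleton_append]
      split <;> simp
  | case3 c rest h ih =>
    rw [pvRunsB]
    simp [h, pvEmit, ih, PySem.Chars.lower, PySem.Chars.strLt]

lemma pvJoin_nil (l : List (List Char)) : PySem.Chars.join [] l = l.flatten := by
  unfold PySem.Chars.join List.intercalate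
  induction l with
  | nil => rfl
  | cons a t ih =>
    cases t with
    | nil => simp
    | cons b u => simp_all [List.intersperse]

-- ===== VERDICT (by name: the statement is the Claim_ definition above) =====
theorem first_letter_filter_spec : Claim_equal_first_letter_filter := by
  intro letter phrase _
  unfold Spec_first_letter_filter first_letter_filter first_letter_filter_alt
  have h := pvFoldA_emit phrase.toList [] []
  simp only [List.nil_append] at h
  rw [pvJoin_nil, ← pvEmit_nil_eq_runs, ← apply_ite String.ofList, h]
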